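-- pv_equiv track=rewrite | github.com/leetTills/Graphs | projects/ancestor/ancestor.py | earliest_ancestor
-- ===== SOURCE A (Python) =====
-- def earliest_ancestor(ancestors, starting_node, visited=None):
--     if visited is None:
--         visited = []
--
--     for i in ancestors:
--         if i[1] == starting_node:
--             visited.append(i[0])
--             return earliest_ancestor(ancestors, i[0], visited)
--
--     for i in ancestors:
--         if i[0] == starting_node and i[0] in visited:
--             return i[0]
--
--     return -1
-- ===== SOURCE B (Python) =====
-- def earliest_ancestor(ancestors, starting_node, visited=None):
--     if visited is None:
--         visited = []
--     first_parent = {}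
--     parents = set()
--     for a, b in ancestors:
--         parents.add(a)
--         if b not in first_parent:
--             first_parent[b] = a
--     node = starting_node
--     while node in first_parent:
--         node = first_parent[node]
--         visited.append(node)
--     if node in parents and node in visited:
--         return node
--     return -1
-- ===== Notes on version B (the rewrite author's own statement) =====
-- stated objective: alternative
-- what changed: Replaces the recursion that rescans the edge list at every step with a single pre-pass building a first-parent dict and a parents set, then an iterative dict-lookup walk.
import Mathlib
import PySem

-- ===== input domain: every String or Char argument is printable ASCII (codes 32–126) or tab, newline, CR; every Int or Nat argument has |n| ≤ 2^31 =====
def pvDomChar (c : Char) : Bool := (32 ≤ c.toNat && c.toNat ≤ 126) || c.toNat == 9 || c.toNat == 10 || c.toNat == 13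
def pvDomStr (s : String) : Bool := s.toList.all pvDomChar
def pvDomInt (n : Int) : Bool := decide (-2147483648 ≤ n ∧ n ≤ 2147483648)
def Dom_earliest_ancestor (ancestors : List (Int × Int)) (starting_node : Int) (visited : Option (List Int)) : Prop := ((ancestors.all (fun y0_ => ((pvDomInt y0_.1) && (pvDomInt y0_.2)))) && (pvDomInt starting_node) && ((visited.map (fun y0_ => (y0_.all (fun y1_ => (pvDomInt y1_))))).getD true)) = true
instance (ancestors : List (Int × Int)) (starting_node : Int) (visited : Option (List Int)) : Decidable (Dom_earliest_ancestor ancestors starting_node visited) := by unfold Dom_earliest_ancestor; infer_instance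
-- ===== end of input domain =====

-- B replaces A's per-step rescans of the edge list by one pre-pass building a first-parent
-- dict and a parents set, then an iterative dict-lookup walk (alternative algorithm, same measured cost).
-- Both A and B mutate a caller-supplied `visited` list identically; the theorems are about the return value.

-- ===== PORT A =====
-- fuel makes the recursion total; under Pre_ (first-parent chain terminates) fuel
-- ancestors.length + 1 is never exhausted, so the 0-case is unreachable on Pre_.
def earliest_ancestor_go (ancestors : List (Int × Int)) : Nat → Int → List Int → Int
  | 0, _, _ => -1
  | fuel+1, node, visited =>
    match ancestors.find? (fun i => i.2 == node) with
    | some i => earliest_ancestor_go ancestors fuel i.1 (visited ++ [i.1])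
    | none =>
      match ancestors.find? (fun i => i.1 == node && visited.contains i.1) with
      | some i => i.1
      | none => -1

def earliest_ancestor (ancestors : List (Int × Int)) (starting_node : Int) (visited : Option (List Int)) : Int :=
  earliest_ancestor_go ancestors (ancestors.length + 1) starting_node (visited.getD [])

-- ===== PORT B =====
-- one pass over ancestors: the parents set and the first-parent dict (first edge wins)
def eaPrep (ancestors : List (Int × Int)) : PySem.Set Int × PySem.Dict Int Int :=
  ancestors.foldl
    (fun st e => (PySem.Set.add st.1 e.1, if st.2.contains e.2 then st.2 else st.2.insert e.2 e.1))
    (PySem.Set.empty, PySem.Dict.empty)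

-- the while loop, fueled for totality; returns the final node and the mutated visited list
def eaWalk (fp : PySem.Dict Int Int) : Nat → Int → List Int → Int × List Int
  | 0, node, visited => (node, visited)
  | fuel+1, node, visited =>
    match fp.get? node with
    | some p => eaWalk fp fuel p (visited ++ [p])
    | none => (node, visited)

def earliest_ancestor_alt (ancestors : List (Int × Int)) (starting_node : Int) (visited : Option (List Int)) : Int :=
  let prep := eaPrep ancestors
  let r := eaWalk prep.2 (ancestors.length + 1) starting_node (visited.getD [])
  if PySem.Set.contains prep.1 r.1 && r.2.contains r.1 then r.1 else -1

-- ===== PRECONDITION & SPEC =====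
-- first parent of n: first edge (p, c) with c = n
def eaFirstPar (ancestors : List (Int × Int)) (n : Int) : Option Int :=
  (ancestors.find? (fun i => i.2 == n)).map (·.1)

-- one step of the first-parent map (a parentless node is a fixed point)
def eaStep (ancestors : List (Int × Int)) (n : Int) : Int :=
  (eaFirstPar ancestors n).getD n

-- Pre_ excludes exactly the inputs whose first-parent chain from starting_node never reaches a
-- parentless node (equivalently, by pigeonhole, not within ancestors.length applications of the
-- first-parent map): on those inputs Python A raises RecursionError.
def Pre_earliest_ancestor (ancestors : List (Int × Int)) (starting_node : Int) (visited : Option (List Int)) : Prop :=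
  eaFirstPar ancestors ((eaStep ancestors)^[ancestors.length] starting_node) = none

instance (ancestors : List (Int × Int)) (starting_node : Int) (visited : Option (List Int)) : Decidable (Pre_earliest_ancestor ancestors starting_node visited) := by unfold Pre_earliest_ancestor; infer_instance

def pvWitness_earliest_ancestor : (List (Int × Int)) × Int × Option (List Int) := ([(1, 2), (3, 1)], 2, none)

def Spec_earliest_ancestor (ancestors : List (Int × Int)) (starting_node : Int) (visited : Option (List Int)) (out : Int) : Prop := out = earliest_ancestor_alt ancestors starting_node visited
instance (ancestors : List (Int × Int)) (starting_node : Int) (visited : Option (List Int)) (out : Int) : Decidable (Spec_earliest_ancestor ancestors starting_node visited out) := by unfold Spec_earliest_ancestor; infer_instance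

-- ===== CLAIM (what is proved, stated in full; the proofs are below) =====
def Claim_equal_earliest_ancestor : Prop := ∀ (ancestors : List (Int × Int)) (starting_node : Int) (visited : Option (List Int)), Dom_earliest_ancestor ancestors starting_node visited → Pre_earliest_ancestor ancestors starting_node visited → Spec_earliest_ancestor ancestors starting_node visited (earliest_ancestor ancestors starting_node visited)

-- ===== LEMMAS AND PROOFS =====

theorem go_succ (ancestors : List (Int × Int)) (fuel : Nat) (n : Int) (v : List Int) :
    earliest_ancestor_go ancestors (fuel + 1) n v =
      (match ancestors.find? (fun i => i.2 == n) with
       | some i => earliest_ancestor_go ancestors fuel i.1 (v ++ [i.1])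
       | none =>
         match ancestors.find? (fun i => i.1 == n && v.contains i.1) with
         | some i => i.1
         | none => -1) := rfl

theorem walk_succ (fp : PySem.Dict Int Int) (fuel : Nat) (n : Int) (v : List Int) :
    eaWalk fp (fuel + 1) n v =
      (match fp.get? n with
       | some p => eaWalk fp fuel p (v ++ [p])
       | none => (n, v)) := rfl

-- the pair-fold splits into its two component folds
theorem eaPrep_split (ancestors : List (Int × Int)) :
    eaPrep ancestors =
      (ancestors.foldl (fun s e => PySem.Set.add s e.1) PySem.Set.empty,
       ancestors.foldl (fun d e => if d.contains e.2 then d else d.insert e.2 e.1) PySem.Dict.empty) := by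
  unfold eaPrep
  generalize (PySem.Set.empty : PySem.Set Int) = s
  generalize (PySem.Dict.empty : PySem.Dict Int Int) = d
  induction ancestors generalizing s d with
  | nil => rfl
  | cons e l ih => simp [List.foldl_cons, ih]

-- the dict built by "insert if absent" looks up the FIRST matching edge
theorem eaDict_get (l : List (Int × Int)) (d : PySem.Dict Int Int) (n : Int) :
    (l.foldl (fun d e => if d.contains e.2 then d else d.insert e.2 e.1) d).get? n =
      ((d.get? n).or ((l.find? (fun i => i.2 == n)).map (·.1))) := by
  induction l generalizing d with
  | nil => simp
  | cons e l ih =>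
    simp only [List.foldl_cons, List.find?_cons]
    by_cases hc : d.contains e.2
    · simp only [hc, if_pos]
      rw [ih]
      by_cases he : e.2 = n
      · subst he
        have hs : (d.get? e.2).isSome := by rw [← PySem.Dict.contains_eq_isSome_get?]; exact hc
        cases hg : d.get? e.2 with
        | none => rw [hg] at hs; simp at hs
        | some w => simp
      · have hb : (e.2 == n) = false := by simp [he]
        simp [hb]
    · simp only [hc, if_neg, Bool.not_eq_true]
      rw [ih]
      by_cases he : e.2 = n
      · subst he
        have hnone : d.get? e.2 = none := by
          cases hg : d.get? e.2 with
          | none => rfl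
          | some w =>
            exfalso; apply hc
            rw [PySem.Dict.contains_eq_isSome_get?, hg]; rfl
        rw [PySem.Dict.get?_insert, hnone]
        simp
      · have hb : (e.2 == n) = false := by simp [he]
        rw [PySem.Dict.get?_insert]
        simp [hb, Ne.symm he]

theorem eaPrep_get (ancestors : List (Int × Int)) (n : Int) :
    (eaPrep ancestors).2.get? n = eaFirstPar ancestors n := by
  rw [eaPrep_split]
  simp only [eaFirstPar]
  rw [eaDict_get]
  simp

-- the parents set holds exactly the first components
theorem eaPrep_parents (ancestors : List (Int × Int)) (n : Int) :
    PySem.Set.contains (eaPrep ancestors).1 n = ancestors.any (fun i => i.1 == n) := by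
  rw [eaPrep_split]
  simp only [PySem.Set.contains_eq_listContains]
  rw [Bool.eq_iff_iff]
  simp only [List.contains_iff_mem, List.any_eq_true]
  rw [PySem.Set.mem_foldl_add]
  simp only [PySem.Set.empty, List.not_mem_nil, false_or]
  constructor
  · rintro ⟨b, hb, rfl⟩; exact ⟨b, hb, by simp⟩
  · rintro ⟨b, hb, h⟩; exact ⟨b, hb, ((by simpa using h : b.1 = n)).symm⟩

-- A's terminal scan equals B's membership test
theorem eaFinal (ancestors : List (Int × Int)) (n : Int) (v : List Int) :
    (match ancestors.find? (fun i => i.1 == n && v.contains i.1) with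
     | some i => i.1
     | none => (-1 : Int)) =
    if ancestors.any (fun i => i.1 == n) && v.contains n then n else -1 := by
  cases hf : ancestors.find? (fun i => i.1 == n && v.contains i.1) with
  | some i =>
    have hp := List.find?_some hf
    obtain ⟨h1, h2⟩ : i.1 = n ∧ i.1 ∈ v := by simpa using hp
    have hm := List.mem_of_find?_eq_some hf
    have hany : ancestors.any (fun i => i.1 == n) = true := by
      simp only [List.any_eq_true]; exact ⟨i, hm, by simp [h1]⟩
    have hv : n ∈ v := h1 ▸ h2
    simp [hany, hv, h1]
  | none =>
    by_cases hv : n ∈ v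
    · have hany : ancestors.any (fun i => i.1 == n) = false := by
        rw [List.any_eq_false]
        intro x hx
        have := List.find?_eq_none.mp hf x hx
        by_cases hx1 : x.1 = n
        · subst hx1; simp [hv] at this
        · simp [hx1]
      simp [hany]
    · simp [hv]

-- main induction: equal fuel, terminating chain ⇒ A's run = B's run + final test
theorem eaMain (ancestors : List (Int × Int)) (k : Nat) (n : Int) (v : List Int)
    (h : eaFirstPar ancestors ((eaStep ancestors)^[k] n) = none) :
    earliest_ancestor_go ancestors (k + 1) n v =
      (let r := eaWalk (eaPrep ancestors).2 (k + 1) n v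
       if PySem.Set.contains (eaPrep ancestors).1 r.1 && r.2.contains r.1 then r.1 else -1) := by
  induction k generalizing n v with
  | zero =>
    rw [Function.iterate_zero_apply] at h
    cases hf : ancestors.find? (fun i => i.2 == n) with
    | some i => exfalso; simp [eaFirstPar, hf] at h
    | none =>
      rw [go_succ, walk_succ, eaPrep_get, h, hf]
      dsimp only
      rw [eaFinal, eaPrep_parents]
  | succ k ih =>
    rw [Function.iterate_succ_apply] at h
    cases hf : ancestors.find? (fun i => i.2 == n) with
    | some i =>
      have hp : eaFirstPar ancestors n = some i.1 := by simp [eaFirstPar, hf]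
      rw [show eaStep ancestors n = i.1 from by simp [eaStep, hp]] at h
      rw [go_succ, walk_succ, eaPrep_get, hp, hf]
      dsimp only
      exact ih i.1 (v ++ [i.1]) h
    | none =>
      have hp : eaFirstPar ancestors n = none := by simp [eaFirstPar, hf]
      rw [go_succ, walk_succ, eaPrep_get, hp, hf]
      dsimp only
      rw [eaFinal, eaPrep_parents]

-- ===== VERDICT (by name: the statement is the Claim_ definition above) =====
theorem earliest_ancestor_spec : Claim_equal_earliest_ancestor := by
  intro ancestors starting_node visited _ hpre
  unfold Spec_earliest_ancestor earliest_ancestor earliest_ancestor_alt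
  exact eaMain ancestors ancestors.length starting_node (visited.getD []) hpre
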